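-- pv_equiv track=rewrite | github.com/JohnHammond/katana | katana/units/crypto/rsa.py | contfrac_to_rational
-- ===== SOURCE A (Python) =====
-- def contfrac_to_rational(frac: list):
--     """
--     This function is used for the Weiner's Little D attack.
--
--     Converts a finite continued fraction ``[a0, ..., an]`` to an x/y rational.
--     """
--
--     if len(frac) == 0:
--         return 0, 1
--     num = frac[-1]
--     denom = 1
--     for _ in range(-2, -len(frac) - 1, -1):
--         num, denom = frac[_] * num + denom, num
--     return num, denom
-- ===== SOURCE B (Python) =====
-- def contfrac_to_rational(frac: list):
--     """Forward convergent recurrence: left-to-right over the continued fraction."""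
--     if not frac:
--         return 0, 1
--     h1, h2 = 1, 0
--     k1, k2 = 0, 1
--     for a in frac:
--         h1, h2 = a * h1 + h2, h1
--         k1, k2 = a * k1 + k2, k1
--     return h1, k1
-- ===== Notes on version B (the rewrite author's own statement) =====
-- stated objective: alternative
-- what changed: Replaces A's backward fold (seeded at frac[-1], iterating over negative indices right-to-left) with the standard forward continued-fraction convergent recurrence maintaining two running (h,k) pairs left-to-right.
import Mathlib
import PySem

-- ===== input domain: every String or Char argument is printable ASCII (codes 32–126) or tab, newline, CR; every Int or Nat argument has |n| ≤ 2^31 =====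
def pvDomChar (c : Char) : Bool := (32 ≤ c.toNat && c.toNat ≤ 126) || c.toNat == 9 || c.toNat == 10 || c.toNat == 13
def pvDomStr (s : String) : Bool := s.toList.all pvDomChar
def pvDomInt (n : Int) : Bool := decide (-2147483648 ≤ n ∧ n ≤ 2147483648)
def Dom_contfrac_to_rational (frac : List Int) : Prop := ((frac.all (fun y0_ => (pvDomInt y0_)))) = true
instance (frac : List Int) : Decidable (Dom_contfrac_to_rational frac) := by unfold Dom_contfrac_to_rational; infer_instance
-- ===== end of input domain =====

-- B replaces A's backward fold over negative indices by the standard forward convergent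
-- recurrence (h,k pairs updated left-to-right); objective: alternative (same cost, clearer).


-- ===== PORT A =====
-- Literal port of A: num = frac[-1]; for _ in range(-2, -len(frac)-1, -1): num, denom = frac[_]*num+denom, num.
-- All indices are in range when the length-0 guard fails, so pyGetD's default 0 is never used.
def contfrac_to_rational (frac : List Int) : Int × Int :=
  if frac.length = 0 then (0, 1)
  else
    let num := PySem.List.pyGetD frac (-1) 0
    let denom : Int := 1
    (PySem.List.pyRange (-2) (-(frac.length : Int) - 1) (-1)).foldl
      (fun (s : Int × Int) i => (PySem.List.pyGetD frac i 0 * s.1 + s.2, s.1)) (num, denom)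

-- ===== PORT B =====
-- Port of B: forward recurrence over two running convergents (h1,h2) and (k1,k2).
def contfrac_to_rational_alt (frac : List Int) : Int × Int :=
  if frac = [] then (0, 1)
  else
    let s := frac.foldl
      (fun (s : (Int × Int) × (Int × Int)) a =>
        ((a * s.1.1 + s.1.2, s.1.1), (a * s.2.1 + s.2.2, s.2.1)))
      ((1, 0), (0, 1))
    (s.1.1, s.2.1)

-- ===== PRECONDITION & SPEC =====
def Spec_contfrac_to_rational (frac : List Int) (out : Int × Int) : Prop := out = contfrac_to_rational_alt frac
instance (frac : List Int) (out : Int × Int) : Decidable (Spec_contfrac_to_rational frac out) := by unfold Spec_contfrac_to_rational; infer_instance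

-- ===== CLAIM (what is proved, stated in full; the proofs are below) =====
def Claim_equal_contfrac_to_rational : Prop := ∀ (frac : List Int), Dom_contfrac_to_rational frac → Spec_contfrac_to_rational frac (contfrac_to_rational frac)

-- ===== LEMMAS AND PROOFS =====

-- frac.reverse.tail as a range comprehension (for translating A's index loop)
lemma reverse_tail_eq_map_range (frac : List Int) (h : frac ≠ []) :
    frac.reverse.tail
      = (List.range (frac.length - 1)).map
          (fun (k : Nat) => PySem.List.pyGetD frac (-2 - (k : Int)) 0) := by
  apply List.ext_getElem
  · simp
  · intro j h1 h2
    simp only [List.getElem_map, List.getElem_range]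
    have hL : 1 ≤ frac.length := List.length_pos_iff.mpr h
    have hj : j < frac.length - 1 := by simpa using h1
    have : (-2 - (j : Int)) = -(((j + 2 : Nat)) : Int) := by push_cast; ring
    rw [this, PySem.List.pyGetD_neg_natCast _ _ _ (by omega) (by omega)]
    rw [List.getElem_tail, List.getElem_reverse]
    congr 1
    omega

-- A's index loop is a fold of the step over frac.reverse.tail
lemma A_foldl_eq (frac : List Int) (h : frac ≠ []) (s : Int × Int) :
    (PySem.List.pyRange (-2) (-(frac.length : Int) - 1) (-1)).foldl
        (fun (s : Int × Int) i => (PySem.List.pyGetD frac i 0 * s.1 + s.2, s.1)) s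
      = frac.reverse.tail.foldl (fun (s : Int × Int) x => (x * s.1 + s.2, s.1)) s := by
  have hL : 1 ≤ frac.length := List.length_pos_iff.mpr h
  rw [PySem.List.pyRange_neg_one, reverse_tail_eq_map_range frac h, List.foldl_map, List.foldl_map]
  have : ((-2 : Int) - (-(frac.length : Int) - 1)).toNat = frac.length - 1 := by omega
  rw [this]

-- head recursion for A on lists of length ≥ 2
lemma A_cons (a : Int) (rest : List Int) (h : rest ≠ []) :
    contfrac_to_rational (a :: rest)
      = (a * (contfrac_to_rational rest).1 + (contfrac_to_rational rest).2,
         (contfrac_to_rational rest).1) := by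
  have hne : (a :: rest) ≠ ([] : List Int) := by simp
  unfold contfrac_to_rational
  rw [if_neg (by simp), if_neg (by simp [List.length_eq_zero_iff, h])]
  simp only []
  rw [A_foldl_eq _ hne, A_foldl_eq _ h]
  have htail : (a :: rest).reverse.tail = rest.reverse.tail ++ [a] := by
    rw [List.reverse_cons, List.tail_append_of_ne_nil]
    simp [h]
  have hlast : PySem.List.pyGetD (a :: rest) (-1) 0 = PySem.List.pyGetD rest (-1) 0 := by
    rw [PySem.List.pyGetD_neg_one _ _ hne, PySem.List.pyGetD_neg_one _ _ h,
        List.getLast_cons h]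
  rw [htail, List.foldl_append, hlast]
  simp

lemma A_singleton (a : Int) : contfrac_to_rational [a] = (a, 1) := by
  unfold contfrac_to_rational
  norm_num [PySem.List.pyRange_neg_one, PySem.List.pyGetD_neg_one]

-- the forward fold computes the linear combination of A's convergents
lemma B_fold (frac : List Int) (h : frac ≠ []) :
    ∃ p q : Int, ∀ s : (Int × Int) × (Int × Int),
      frac.foldl
        (fun (s : (Int × Int) × (Int × Int)) a =>
          ((a * s.1.1 + s.1.2, s.1.1), (a * s.2.1 + s.2.2, s.2.1))) s
      = ((s.1.1 * (contfrac_to_rational frac).1 + s.1.2 * (contfrac_to_rational frac).2,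
          s.1.1 * p + s.1.2 * q),
         (s.2.1 * (contfrac_to_rational frac).1 + s.2.2 * (contfrac_to_rational frac).2,
          s.2.1 * p + s.2.2 * q)) := by
  induction frac with
  | nil => exact absurd rfl h
  | cons a rest ih =>
    cases rest with
    | nil =>
      refine ⟨1, 0, fun s => ?_⟩
      simp only [List.foldl_cons, List.foldl_nil, A_singleton, Prod.mk.injEq]
      refine ⟨⟨by ring, by ring⟩, by ring, by ring⟩
    | cons b t =>
      obtain ⟨p', q', hpq⟩ := ih (by simp)
      refine ⟨a * p' + q', p', fun s => ?_⟩
      rw [List.foldl_cons, hpq, A_cons a (b :: t) (by simp)]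
      simp only [Prod.mk.injEq]
      refine ⟨⟨by ring, by ring⟩, by ring, by ring⟩

-- ===== VERDICT (by name: the statement is the Claim_ definition above) =====
theorem contfrac_to_rational_spec : Claim_equal_contfrac_to_rational := by
  intro frac _
  unfold Spec_contfrac_to_rational contfrac_to_rational_alt
  cases hf : frac with
  | nil => simp [contfrac_to_rational]
  | cons a rest =>
    rw [if_neg (by simp)]
    obtain ⟨p, q, hpq⟩ := B_fold (a :: rest) (by simp)
    simp only [hpq]
    ring_nf
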